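-- pv_equiv track=rewrite | github.com/igutiez/gunovel | novela-app/app/ai/grafo.py | _insertar_seccion
-- ===== SOURCE A (Python) =====
-- def _buscar_indice(
--     bloques: list[tuple[int, str, list[str]]], ruta: list[str]
-- ) -> int:
--     """Índice del bloque que matchea la ruta jerárquica, o -1."""
--     nivel_esperado = 2  # "## " para el primer segmento (debajo del H1 raíz).
--     i = 0
--     for seg in ruta:
--         encontrado = False
--         while i < len(bloques):
--             nivel, titulo, _ = bloques[i]
--             if nivel < nivel_esperado:
--                 return -1
--             if nivel == nivel_esperado and _coincide(titulo, seg):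
--                 encontrado = True
--                 break
--             i += 1
--         if not encontrado:
--             return -1
--         nivel_esperado += 1
--         i += 1  # Buscamos los hijos después del bloque encontrado.
--     return i - 1
--
-- def _coincide(a: str, b: str) -> bool:
--     return a.strip().lower() == b.strip().lower()
--
-- def _indice_fin_subarbol(bloques: list, idx_inicio: int) -> int:
--     """Primer índice > idx_inicio cuyo nivel <= nivel del bloque idx_inicio."""
--     nivel = bloques[idx_inicio][0]
--     for i in range(idx_inicio + 1, len(bloques)):
--         if bloques[i][0] <= nivel:
--             return i
--     return len(bloques)
--
-- def _insertar_seccion(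
--     bloques: list, ruta: list[str], lineas_texto: list[str]
-- ) -> list:
--     """Inserta una sección nueva, creando padres intermedios si faltan."""
--     prefijo_actual: list[str] = []
--     for idx_seg, seg in enumerate(ruta):
--         prefijo_actual.append(seg)
--         idx = _buscar_indice(bloques, prefijo_actual)
--         if idx >= 0:
--             continue
--         # Hay que crear esta sección; si estamos en el último segmento, le ponemos cuerpo.
--         nivel = 2 + idx_seg
--         cuerpo = lineas_texto if idx_seg == len(ruta) - 1 else []
--         # Insertar al final del subárbol padre (o al final del fichero si no hay padre).
--         if idx_seg == 0:
--             # Sección de nivel 2 → después de la última sección de nivel >=2 existente.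
--             pos = len(bloques)
--         else:
--             padre = prefijo_actual[:-1]
--             idx_padre = _buscar_indice(bloques, padre)
--             if idx_padre < 0:
--                 pos = len(bloques)
--             else:
--                 pos = _indice_fin_subarbol(bloques, idx_padre)
--         bloques.insert(pos, (nivel, seg, list(cuerpo)))
--     return bloques
-- ===== SOURCE B (Python) =====
-- def _insertar_seccion(bloques, ruta, lineas_texto):
--     # One linear walk over the blocks finds the deepest already-existing prefix
--     # of ruta (depth d, index of its block last); the scan stops at the first
--     # block shallower than the level currently expected, exactly as the
--     # hierarchical search does.
--     d, last = 0, -1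
--     for i, (nivel, titulo, _) in enumerate(bloques):
--         if d == len(ruta) or nivel < 2 + d:
--             break
--         if nivel == 2 + d and titulo.strip().lower() == ruta[d].strip().lower():
--             d, last = d + 1, i
--     if d == len(ruta):
--         return bloques
--     # One insertion point: end of file if nothing matched, else the end of the
--     # matched parent's subtree.
--     if d == 0:
--         pos = len(bloques)
--     else:
--         nivel_padre = bloques[last][0]
--         pos = next((j for j in range(last + 1, len(bloques))
--                     if bloques[j][0] <= nivel_padre), len(bloques))
--     # Splice the whole missing tail in at once, as a nested chain.
--     nuevos = [(2 + k, ruta[k], list(lineas_texto) if k == len(ruta) - 1 else [])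
--               for k in range(d, len(ruta))]
--     bloques[pos:pos] = nuevos
--     return bloques
-- ===== Notes on version B (the rewrite author's own statement) =====
-- stated objective: faster
-- what changed: B replaces A's per-prefix hierarchical searches (a fresh _buscar_indice descent from index 0 for every prefix of ruta, plus one for the parent) and its chain of single inserts with one linear walk over the blocks that finds the deepest existing prefix, one scan for the parent's subtree end, and a single slice splice of the whole missing tail built by a comprehension.
import Mathlib
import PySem

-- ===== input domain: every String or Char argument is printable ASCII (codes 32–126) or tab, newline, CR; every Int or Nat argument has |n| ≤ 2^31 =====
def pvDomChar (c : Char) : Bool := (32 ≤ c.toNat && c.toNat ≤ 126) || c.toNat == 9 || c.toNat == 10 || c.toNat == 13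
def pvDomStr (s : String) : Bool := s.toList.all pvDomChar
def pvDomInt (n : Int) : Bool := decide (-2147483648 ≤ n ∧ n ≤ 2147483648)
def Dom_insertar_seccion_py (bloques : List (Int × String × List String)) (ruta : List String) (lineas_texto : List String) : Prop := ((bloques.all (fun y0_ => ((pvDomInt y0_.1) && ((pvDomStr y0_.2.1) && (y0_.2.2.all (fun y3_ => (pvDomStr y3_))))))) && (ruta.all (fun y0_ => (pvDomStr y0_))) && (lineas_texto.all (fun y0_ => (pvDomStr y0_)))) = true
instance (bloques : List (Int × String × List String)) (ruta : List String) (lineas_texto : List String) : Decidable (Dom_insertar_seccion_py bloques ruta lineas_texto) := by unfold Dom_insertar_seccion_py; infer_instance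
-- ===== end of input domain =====

-- ===== PORT A =====
-- B replaces A's per-prefix hierarchical searches and its chain of single inserts with one
-- linear walk plus one slice splice of the whole missing tail (objective: faster, measured).
-- Python A and B both mutate `bloques` in place identically; the theorems are about the
-- returned list.

-- _coincide
def pvCoin (a b : String) : Bool :=
  PySem.Str.lower (PySem.Str.strip a) == PySem.Str.lower (PySem.Str.strip b)

-- the inner `while i < len(bloques)` of _buscar_indice, walking the suffix bloques[i:]
-- with i the running index; returns the matching index, none on a shallower block or the end
def scanGoA (seg : String) (lvl : Int) : List (Int × String × List String) → Nat → Option Nat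
  | [], _ => none
  | (nivel, titulo, _) :: resto, i =>
    if nivel < lvl then none
    else if nivel == lvl && pvCoin titulo seg then some i
    else scanGoA seg lvl resto (i + 1)

-- the `for seg in ruta` loop of _buscar_indice (lvl = nivel_esperado)
def buscarLoopA (bl : List (Int × String × List String)) :
    List String → Nat → Int → Int
  | [], i, _ => (i : Int) - 1
  | seg :: resto, i, lvl =>
    match scanGoA seg lvl (bl.drop i) i with
    | none => -1
    | some j => buscarLoopA bl resto (j + 1) (lvl + 1)

-- _buscar_indice
def buscarIndiceA (bl : List (Int × String × List String)) (ruta : List String) : Int :=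
  buscarLoopA bl ruta 0 2

-- the `for i in range(idx+1, len(bloques))` of _indice_fin_subarbol
def finGoA (nivel : Int) : List (Int × String × List String) → Nat → Nat
  | [], j => j
  | b :: resto, j => if b.1 ≤ nivel then j else finGoA nivel resto (j + 1)

-- _indice_fin_subarbol (only ever called with a valid index, so getD is exact there)
def finSubA (bl : List (Int × String × List String)) (idx : Nat) : Nat :=
  finGoA ((bl[idx]?.getD (0, "", [])).1) (bl.drop (idx + 1)) (idx + 1)

-- Python's list.insert for 0 ≤ pos ≤ len (the only calls A makes)
def pyInsert (l : List (Int × String × List String)) (pos : Nat)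
    (x : Int × String × List String) : List (Int × String × List String) :=
  l.take pos ++ x :: l.drop pos

-- the `for idx_seg, seg in enumerate(ruta)` loop of _insertar_seccion,
-- pref = prefijo_actual before appending seg, k = idx_seg
def insLoopA (lineas : List String) (rlen : Nat) :
    List (Int × String × List String) → List String → Nat → List String →
    List (Int × String × List String)
  | bl, _, _, [] => bl
  | bl, pref, k, seg :: resto =>
    let pref' := pref ++ [seg]
    let idx := buscarIndiceA bl pref'
    if 0 ≤ idx then insLoopA lineas rlen bl pref' (k + 1) resto
    else
      let nivel : Int := 2 + (k : Int)
      let cuerpo := if k = rlen - 1 then lineas else ([] : List String)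
      let pos :=
        if k = 0 then bl.length
        else
          let idxPadre := buscarIndiceA bl pref
          if idxPadre < 0 then bl.length else finSubA bl idxPadre.toNat
      insLoopA lineas rlen (pyInsert bl pos (nivel, seg, cuerpo)) pref' (k + 1) resto

def insertar_seccion_py (bloques : List (Int × String × List String)) (ruta : List String) (lineas_texto : List String) : List (Int × String × List String) :=
  insLoopA lineas_texto ruta.length bloques [] 0 ruta

-- ===== PORT B =====
-- B's single `for i, (nivel, titulo, _) in enumerate(bloques)` walk: state (d, last);
-- ruta[d] is guarded by d ≠ len(ruta), so getD is exact
def walkB (ruta : List String) : List (Int × String × List String) → Nat → Nat → Int → Nat × Int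
  | [], _, d, last => (d, last)
  | (nivel, titulo, _) :: resto, i, d, last =>
    if d = ruta.length ∨ nivel < 2 + (d : Int) then (d, last)
    else if nivel == 2 + (d : Int) && pvCoin titulo (ruta.getD d "") then
      walkB ruta resto (i + 1) (d + 1) (i : Int)
    else walkB ruta resto (i + 1) d last

-- B's `next((j for j in range(last+1, len(bloques)) if bloques[j][0] <= nivel_padre), len(bloques))`
-- (only reached with 0 ≤ last < len, so getD is exact)
def posB (bl : List (Int × String × List String)) (last : Int) : Nat :=
  match (bl.drop (last.toNat + 1)).findIdx? (fun b => b.1 ≤ (bl[last.toNat]?.getD (0, "", [])).1) with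
  | some t => last.toNat + 1 + t
  | none => bl.length

def insertar_seccion_py_alt (bloques : List (Int × String × List String)) (ruta : List String) (lineas_texto : List String) : List (Int × String × List String) :=
  let r := walkB ruta bloques 0 0 (-1)
  if r.1 = ruta.length then bloques
  else
    let pos := if r.1 = 0 then bloques.length else posB bloques r.2
    let nuevos := (PySem.List.pyRange (r.1 : Int) (ruta.length : Int) 1).map
      (fun k => (2 + k, ruta.getD k.toNat "",
        if k = (ruta.length : Int) - 1 then lineas_texto else ([] : List String)))
    bloques.take pos ++ nuevos ++ bloques.drop pos

-- ===== PRECONDITION & SPEC =====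
def Spec_insertar_seccion_py (bloques : List (Int × String × List String)) (ruta : List String) (lineas_texto : List String) (out : List (Int × String × List String)) : Prop := out = insertar_seccion_py_alt bloques ruta lineas_texto
instance (bloques : List (Int × String × List String)) (ruta : List String) (lineas_texto : List String) (out : List (Int × String × List String)) : Decidable (Spec_insertar_seccion_py bloques ruta lineas_texto out) := by unfold Spec_insertar_seccion_py; infer_instance

-- ===== CLAIM (what is proved, stated in full; the proofs are below) =====
def Claim_equal_insertar_seccion_py : Prop := ∀ (bloques : List (Int × String × List String)) (ruta : List String) (lineas_texto : List String), Dom_insertar_seccion_py bloques ruta lineas_texto → Spec_insertar_seccion_py bloques ruta lineas_texto (insertar_seccion_py bloques ruta lineas_texto)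

-- ===== LEMMAS AND PROOFS =====

lemma pvCoin_refl (a : String) : pvCoin a a = true := by
  unfold pvCoin; exact beq_self_eq_true _

-- proof-side intermediate form: the per-segment descent (A's search structure, shared
-- state with B's walk); both programs are related to it
def descendB (bl : List (Int × String × List String)) :
    List String → Nat → Nat → Int → Nat × Int
  | [], _, d, last => (d, last)
  | seg :: resto, i, d, last =>
    match scanGoA seg (2 + (d : Int)) (bl.drop i) i with
    | none => (d, last)
    | some j => descendB bl resto (j + 1) (d + 1) (j : Int)

-- proof-side: A's chain of inserts at consecutive positions
def chainB (lineas : List String) (rlen : Nat) :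
    List (Int × String × List String) → Nat → Nat → List String →
    List (Int × String × List String)
  | bl, _, _, [] => bl
  | bl, pos, k, seg :: resto =>
    let cuerpo := if k = rlen - 1 then lineas else ([] : List String)
    chainB lineas rlen (pyInsert bl pos (2 + (k : Int), seg, cuerpo)) (pos + 1) (k + 1) resto

-- "the scan walks past every element of l": none is shallow, none matches
def pvNoHit (seg : String) (lvl : Int) (l : List (Int × String × List String)) : Prop :=
  ∀ b ∈ l, lvl ≤ b.1 ∧ (b.1 == lvl && pvCoin b.2.1 seg) = false

-- "the scan aborts inside l on a block shallower than lvl"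
def pvLow (seg : String) (lvl : Int) : List (Int × String × List String) → Prop
  | [] => False
  | b :: resto => b.1 < lvl ∨ ((b.1 == lvl && pvCoin b.2.1 seg) = false ∧ pvLow seg lvl resto)

lemma scan_nohit_append {seg lvl l} (h : pvNoHit seg lvl l) :
    ∀ rest i, scanGoA seg lvl (l ++ rest) i = scanGoA seg lvl rest (i + l.length) := by
  induction l with
  | nil => intro rest i; simp [scanGoA]
  | cons b r ih =>
    intro rest i
    obtain ⟨n, t, c⟩ := b
    obtain ⟨h1, h2⟩ := h _ (List.mem_cons_self ..)
    have hr : pvNoHit seg lvl r := fun b hb => h b (List.mem_cons_of_mem _ hb)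
    simp only [List.cons_append, scanGoA, if_neg (Int.not_lt.2 h1)]
    simp only at h2
    rw [if_neg (by simp [h2]), ih hr]
    congr 1
    simp [List.length_cons]; omega

lemma scan_none_nohit {seg lvl l rest i} (hge : ∀ b ∈ l, lvl ≤ b.1)
    (h : scanGoA seg lvl (l ++ rest) i = none) : pvNoHit seg lvl l := by
  induction l generalizing i with
  | nil => intro b hb; cases hb
  | cons b r ih =>
    obtain ⟨n, t, c⟩ := b
    have h1 : lvl ≤ n := hge _ (List.mem_cons_self ..)
    simp only [List.cons_append, scanGoA, if_neg (Int.not_lt.2 h1)] at h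
    by_cases hm : ((n : Int) == lvl && pvCoin t seg) = true
    · rw [if_pos hm] at h; cases h
    · rw [if_neg hm] at h
      have := ih (fun b hb => hge b (List.mem_cons_of_mem _ hb)) h
      intro b hb
      rcases List.mem_cons.1 hb with rfl | hb2
      · exact ⟨h1, by simpa using hm⟩
      · exact this b hb2

lemma pvLow_scan_none {seg lvl l} (h : pvLow seg lvl l) :
    ∀ i, scanGoA seg lvl l i = none := by
  induction l with
  | nil => cases h
  | cons b r ih =>
    intro i
    obtain ⟨n, t, c⟩ := b
    rcases h with h | ⟨h2, h3⟩
    · simp only [scanGoA, if_pos h]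
    · simp only at h2
      simp only [scanGoA, h2]
      split
      · rfl
      · simp [ih h3]

lemma pvLow_append {seg lvl l} (h : pvLow seg lvl l) (rest) :
    pvLow seg lvl (l ++ rest) := by
  induction l with
  | nil => cases h
  | cons b r ih =>
    rcases h with h | ⟨h2, h3⟩
    · exact Or.inl h
    · exact Or.inr ⟨h2, ih h3⟩

lemma scan_none_cases {seg lvl l i} (h : scanGoA seg lvl l i = none) :
    pvLow seg lvl l ∨ pvNoHit seg lvl l := by
  induction l generalizing i with
  | nil => exact Or.inr (fun b hb => by cases hb)
  | cons b r ih =>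
    obtain ⟨n, t, c⟩ := b
    simp only [scanGoA] at h
    by_cases hl : (n : Int) < lvl
    · exact Or.inl (Or.inl hl)
    · rw [if_neg hl] at h
      by_cases hm : ((n : Int) == lvl && pvCoin t seg) = true
      · rw [if_pos hm] at h; cases h
      · rw [if_neg hm] at h
        rcases ih h with hlow | hnh
        · exact Or.inl (Or.inr ⟨by simpa using hm, hlow⟩)
        · refine Or.inr (fun b hb => ?_)
          rcases List.mem_cons.1 hb with rfl | hb2
          · exact ⟨Int.not_lt.1 hl, by simpa using hm⟩
          · exact hnh b hb2

lemma scan_some_split {seg lvl l i j} (h : scanGoA seg lvl l i = some j) :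
    ∃ l1 b l2, l = l1 ++ b :: l2 ∧ pvNoHit seg lvl l1 ∧
      (b.1 == lvl && pvCoin b.2.1 seg) = true ∧ j = i + l1.length := by
  induction l generalizing i with
  | nil => cases h
  | cons b r ih =>
    obtain ⟨n, t, c⟩ := b
    simp only [scanGoA] at h
    by_cases hl : (n : Int) < lvl
    · rw [if_pos hl] at h; cases h
    · rw [if_neg hl] at h
      by_cases hm : ((n : Int) == lvl && pvCoin t seg) = true
      · rw [if_pos hm] at h
        refine ⟨[], (n, t, c), r, by simp, ?_, hm, ?_⟩
        · intro b hb; simp at hb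
        · have h1 := Option.some.inj h
          simp only [List.length_nil, Nat.add_zero]
          omega
      · rw [if_neg hm] at h
        obtain ⟨l1, b', l2, rfl, hnh, hb', hj⟩ := ih h
        refine ⟨(n, t, c) :: l1, b', l2, by simp, ?_, hb', by simp [hj, List.length_cons]; omega⟩
        intro b hb
        rcases List.mem_cons.1 hb with rfl | hb2
        · exact ⟨Int.not_lt.1 hl, by simpa using hm⟩
        · exact hnh b hb2

lemma descendB_d_ge (bl : List (Int × String × List String)) :
    ∀ segs i d last, d ≤ (descendB bl segs i d last).1 := by
  intro segs
  induction segs with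
  | nil => intro i d last; exact le_refl d
  | cons seg resto ih =>
    intro i d last
    simp only [descendB]
    cases scanGoA seg (2 + (d : Int)) (bl.drop i) i with
    | none => exact le_refl d
    | some j => exact le_trans (Nat.le_succ d) (ih (j + 1) (d + 1) (j : Int))

lemma descendB_d_le (bl : List (Int × String × List String)) :
    ∀ segs i d last, (descendB bl segs i d last).1 ≤ d + segs.length := by
  intro segs
  induction segs with
  | nil => intro i d last; simp [descendB]
  | cons seg resto ih =>
    intro i d last
    simp only [descendB]
    cases scanGoA seg (2 + (d : Int)) (bl.drop i) i with
    | none => simp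
    | some j =>
      have := ih (j + 1) (d + 1) (j : Int)
      simp only [List.length_cons]
      omega

lemma descendB_last_valid (bl : List (Int × String × List String)) :
    ∀ segs i d last, (0 < d → 0 ≤ last ∧ last < (bl.length : Int)) →
      0 < (descendB bl segs i d last).1 →
      0 ≤ (descendB bl segs i d last).2 ∧ (descendB bl segs i d last).2 < (bl.length : Int) := by
  intro segs
  induction segs with
  | nil => intro i d last h hp; exact h hp
  | cons seg resto ih =>
    intro i d last h hp
    simp only [descendB] at hp ⊢
    cases hscan : scanGoA seg (2 + (d : Int)) (bl.drop i) i with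
    | none => rw [hscan] at hp; exact h hp
    | some j =>
      rw [hscan] at hp
      refine ih (j + 1) (d + 1) (j : Int) (fun _ => ⟨Int.natCast_nonneg j, ?_⟩) hp
      obtain ⟨l1, b, l2, hsplit, _, _, hj⟩ := scan_some_split hscan
      have hne : bl.drop i ≠ [] := by rw [hsplit]; simp
      have hil : i < bl.length := by
        by_contra hcon
        rw [List.drop_eq_nil_of_le (by omega)] at hne
        exact hne rfl
      have hlen := congrArg List.length hsplit
      simp only [List.length_drop, List.length_append, List.length_cons] at hlen
      omega

lemma descend_success {bl : List (Int × String × List String)} :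
    ∀ {segs i d last l'}, descendB bl segs i d last = (d + segs.length, l') → segs ≠ [] →
      0 ≤ l' ∧ (i : Int) ≤ l' ∧
      ∃ b, bl[l'.toNat]? = some b ∧ b.1 = 1 + (d : Int) + segs.length := by
  intro segs
  induction segs with
  | nil => intro i d last l' _ hne; cases hne rfl
  | cons seg resto ih =>
    intro i d last l' h _
    simp only [descendB] at h
    cases hscan : scanGoA seg (2 + (d : Int)) (bl.drop i) i with
    | none =>
      rw [hscan] at h
      exfalso
      have hfst : d = d + (resto.length + 1) := by simpa using congrArg Prod.fst h
      omega
    | some j =>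
      rw [hscan] at h
      replace h : descendB bl resto (j + 1) (d + 1) (j : Int) = (d + (seg :: resto).length, l') := h
      obtain ⟨l1, b, l2, hsplit, _, hb, hj⟩ := scan_some_split hscan
      have hbl : bl[j]? = some b := by
        have h0 : (bl.drop i)[l1.length]? = some b := by
          rw [hsplit]
          rw [List.getElem?_append_right (le_refl _)]
          simp
        rw [List.getElem?_drop] at h0
        rw [hj]; exact h0
      have hblvl : b.1 = 2 + (d : Int) := by
        have := (beq_iff_eq).1 (Bool.and_elim_left hb)
        exact this
      cases resto with
      | nil =>
        simp only [descendB] at h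
        have h2 : (j : Int) = l' := congrArg Prod.snd h
        subst h2
        refine ⟨by positivity, by omega, b, by simpa using hbl, ?_⟩
        rw [hblvl]; simp only [List.length_cons, List.length_nil]; push_cast; ring
      | cons s2 r2 =>
        have h2 : descendB bl (s2 :: r2) (j + 1) (d + 1) (j : Int) =
            ((d + 1) + (s2 :: r2).length, l') := by
          rw [h]; congr 1; simp only [List.length_cons]; omega
        obtain ⟨h0, hle, b2, hb2, hlvl2⟩ := ih h2 (by simp)
        refine ⟨h0, by omega, b2, hb2, ?_⟩
        rw [hlvl2]; simp only [List.length_cons]; push_cast; ring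

lemma drop_pyInsert_of_le {bl : List (Int × String × List String)} {i p : Nat} {N}
    (hip : i ≤ p) (hpl : p ≤ bl.length) :
    (pyInsert bl p N).drop i = (bl.drop i).take (p - i) ++ N :: bl.drop p := by
  unfold pyInsert
  rw [List.drop_append]
  have hl : (bl.take p).length = p := by rw [List.length_take]; omega
  rw [hl, List.drop_take]
  have h0 : i - p = 0 := by omega
  rw [h0, List.drop_zero]

lemma length_pyInsert {bl : List (Int × String × List String)} {p : Nat} {N}
    (hpl : p ≤ bl.length) : (pyInsert bl p N).length = bl.length + 1 := by
  unfold pyInsert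
  simp only [List.length_append, List.length_cons, List.length_take, List.length_drop]
  omega

lemma get?_pyInsert_self {bl : List (Int × String × List String)} {p : Nat} {N}
    (hpl : p ≤ bl.length) : (pyInsert bl p N)[p]? = some N := by
  unfold pyInsert
  have hl : (bl.take p).length = p := by rw [List.length_take]; omega
  rw [List.getElem?_append_right (by rw [hl])]
  rw [hl, Nat.sub_self]
  simp

lemma get?_pyInsert_succ {bl : List (Int × String × List String)} {p : Nat} {N}
    (hpl : p ≤ bl.length) : (pyInsert bl p N)[p + 1]? = bl[p]? := by
  unfold pyInsert
  have hl : (bl.take p).length = p := by rw [List.length_take]; omega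
  rw [List.getElem?_append_right (by rw [hl]; omega)]
  rw [hl]
  have h1 : p + 1 - p = 1 := by omega
  rw [h1]
  have h2 : (N :: bl.drop p)[1]? = (bl.drop p)[0]? := rfl
  rw [h2, List.getElem?_drop, Nat.add_zero]

lemma pyInsert_at_length (bl : List (Int × String × List String)) (N) :
    pyInsert bl bl.length N = bl ++ [N] := by
  unfold pyInsert; simp

lemma scan_stable {bl : List (Int × String × List String)} {seg lvl i j p N}
    (h : scanGoA seg lvl (bl.drop i) i = some j) (hjp : j < p) (hip : i ≤ p)
    (hpl : p ≤ bl.length) :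
    scanGoA seg lvl ((pyInsert bl p N).drop i) i = some j := by
  obtain ⟨l1, b, l2, hsplit, hnh, hb, hj⟩ := scan_some_split h
  rw [drop_pyInsert_of_le hip hpl, hsplit]
  have hlen : l1.length < p - i := by omega
  rw [List.take_append]
  have hto : l1.take (p - i) = l1 := List.take_of_length_le (by omega)
  rw [hto]
  obtain ⟨m, hm⟩ : ∃ m, p - i - l1.length = m + 1 := ⟨p - i - l1.length - 1, by omega⟩
  rw [hm, List.take_succ_cons]
  rw [List.append_assoc, List.cons_append]
  rw [scan_nohit_append hnh]
  obtain ⟨n, t, c⟩ := b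
  simp only [scanGoA]
  simp only at hb
  have hn : ¬ (n : Int) < lvl := by
    have := (beq_iff_eq).1 (Bool.and_elim_left hb); omega
  rw [if_neg hn, if_pos hb, hj]

lemma descend_stab {bl : List (Int × String × List String)} :
    ∀ {segs : List String} {i d : Nat} {last l' : Int} {p : Nat} {N},
      descendB bl segs i d last = (d + segs.length, l') →
      ((l' < (p : Int)) ∨ segs = []) → i ≤ p → p ≤ bl.length →
      descendB (pyInsert bl p N) segs i d last = (d + segs.length, l') := by
  intro segs
  induction segs with
  | nil =>
    intro i d last l' p N h _ _ _
    simpa using h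
  | cons seg resto ih =>
    intro i d last l' p N h hlt hip hpl
    simp only [descendB] at h ⊢
    cases hscan : scanGoA seg (2 + (d : Int)) (bl.drop i) i with
    | none =>
      rw [hscan] at h
      exfalso
      have hfst : d = d + (resto.length + 1) := by simpa using congrArg Prod.fst h
      omega
    | some j =>
      rw [hscan] at h
      replace h : descendB bl resto (j + 1) (d + 1) (j : Int) = (d + (seg :: resto).length, l') := h
      have hsucc : descendB bl resto (j + 1) (d + 1) (j : Int) = ((d + 1) + resto.length, l') := by
        rw [h]; congr 1; simp only [List.length_cons]; omega
      have hlt' : l' < (p : Int) := hlt.resolve_right (by simp)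
      have hjp : j < p := by
        cases resto with
        | nil =>
          simp only [descendB] at hsucc
          have : (j : Int) = l' := congrArg Prod.snd hsucc
          omega
        | cons s2 r2 =>
          obtain ⟨_, hle, _⟩ := descend_success hsucc (by simp)
          omega
      have hnew := scan_stable (N := N) hscan hjp hip hpl
      rw [hnew]
      show descendB (pyInsert bl p N) resto (j + 1) (d + 1) (j : Int) = _
      have hres := ih (N := N) hsucc (by
        cases resto with
        | nil => exact Or.inr rfl
        | cons s2 r2 => exact Or.inl hlt')
        (by omega) hpl
      rw [hres]; congr 1; simp only [List.length_cons]; omega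

lemma descend_comp {bl : List (Int × String × List String)} :
    ∀ {pref : List String} {i d : Nat} {last l' : Int},
      descendB bl pref i d last = (d + pref.length, l') → pref ≠ [] →
      ∀ xs, descendB bl (pref ++ xs) i d last = descendB bl xs (l'.toNat + 1) (d + pref.length) l' := by
  intro pref
  induction pref with
  | nil => intro i d last l' _ hne; cases hne rfl
  | cons seg resto ih =>
    intro i d last l' h _ xs
    simp only [descendB] at h
    simp only [List.cons_append, descendB]
    cases hscan : scanGoA seg (2 + (d : Int)) (bl.drop i) i with
    | none =>
      rw [hscan] at h
      exfalso
      have hfst : d = d + (resto.length + 1) := by simpa using congrArg Prod.fst h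
      omega
    | some j =>
      rw [hscan] at h
      replace h : descendB bl resto (j + 1) (d + 1) (j : Int) = (d + (seg :: resto).length, l') := h
      cases resto with
      | nil =>
        simp only [descendB] at h
        have hj : (j : Int) = l' := congrArg Prod.snd h
        have ht : l'.toNat + 1 = j + 1 := by omega
        rw [ht, ← hj]
        have hd : d + ([seg] : List String).length = d + 1 := by simp
        rw [hd]
        rfl
      | cons s2 r2 =>
        have hsucc : descendB bl (s2 :: r2) (j + 1) (d + 1) (j : Int) =
            ((d + 1) + (s2 :: r2).length, l') := by
          rw [h]; congr 1; simp only [List.length_cons]; omega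
        have hres := ih hsucc (by simp) xs
        have hlen2 : d + (seg :: s2 :: r2).length = d + 1 + (s2 :: r2).length := by
          simp only [List.length_cons]; omega
        rw [hlen2]
        exact hres

lemma buscar_eq (bl : List (Int × String × List String)) :
    ∀ (segs : List String) (i d : Nat) (last : Int),
      buscarLoopA bl segs i (2 + (d : Int)) =
        (if (descendB bl segs i d last).1 = d + segs.length then
          (if segs = [] then (i : Int) - 1 else (descendB bl segs i d last).2)
        else -1) := by
  intro segs
  induction segs with
  | nil => intro i d last; simp [buscarLoopA, descendB]
  | cons seg resto ih =>
    intro i d last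
    cases hscan : scanGoA seg (2 + (d : Int)) (bl.drop i) i with
    | none =>
      have hL : buscarLoopA bl (seg :: resto) i (2 + (d : Int)) = -1 := by
        simp only [buscarLoopA]; rw [hscan]
      have hD : (descendB bl (seg :: resto) i d last).1 = d := by
        simp only [descendB]; rw [hscan]
      rw [hL, hD, if_neg (by simp only [List.length_cons]; omega)]
    | some j =>
      have hL : buscarLoopA bl (seg :: resto) i (2 + (d : Int)) =
          buscarLoopA bl resto (j + 1) (2 + (d : Int) + 1) := by
        simp only [buscarLoopA]; rw [hscan]
      have hD : descendB bl (seg :: resto) i d last =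
          descendB bl resto (j + 1) (d + 1) (j : Int) := by
        simp only [descendB]; rw [hscan]
      have h2 : (2 : Int) + (d : Int) + 1 = 2 + ((d + 1 : Nat) : Int) := by push_cast; ring
      rw [hL, hD, h2, ih (j + 1) (d + 1) (j : Int)]
      cases hresto : resto with
      | nil =>
        subst hresto
        simp [descendB]
      | cons s2 r2 =>
        subst hresto
        have hlen : d + (seg :: s2 :: r2).length = (d + 1) + (s2 :: r2).length := by
          simp only [List.length_cons]; omega
        rw [hlen]
        by_cases hs : (descendB bl (s2 :: r2) (j + 1) (d + 1) (j : Int)).1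
            = (d + 1) + (s2 :: r2).length
        · rw [if_pos hs, if_pos hs, if_neg (List.cons_ne_nil _ _), if_neg (List.cons_ne_nil _ _)]
        · rw [if_neg hs, if_neg hs]

lemma finGo_split (nivel : Int) :
    ∀ (l : List (Int × String × List String)) (j : Nat),
      ∃ l1 l2, l = l1 ++ l2 ∧ (∀ b ∈ l1, nivel < b.1) ∧
        finGoA nivel l j = j + l1.length ∧
        (l2 = [] ∨ ∃ b t, l2 = b :: t ∧ b.1 ≤ nivel) := by
  intro l
  induction l with
  | nil => intro j; exact ⟨[], [], by simp, by simp, by simp [finGoA], Or.inl rfl⟩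
  | cons b r ih =>
    intro j
    by_cases hb : b.1 ≤ nivel
    · exact ⟨[], b :: r, by simp, by simp, by simp [finGoA, hb], Or.inr ⟨b, r, rfl, hb⟩⟩
    · obtain ⟨l1, l2, hsplit, hgt, hfin, hend⟩ := ih (j + 1)
      refine ⟨b :: l1, l2, by simp [hsplit], ?_, ?_, hend⟩
      · intro x hx
        rcases List.mem_cons.1 hx with rfl | hx2
        · omega
        · exact hgt x hx2
      · simp only [finGoA, if_neg hb, hfin, List.length_cons]; omega

lemma drop_cons_of_get? {l : List (Int × String × List String)} {n : Nat}
    {b : Int × String × List String} (h : l[n]? = some b) :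
    l.drop n = b :: l.drop (n + 1) := by
  have hlt : n < l.length := by
    by_contra hcon
    rw [List.getElem?_eq_none (by omega)] at h
    cases h
  rw [List.drop_eq_getElem_cons hlt]
  rw [List.getElem?_eq_getElem hlt] at h
  rw [Option.some.inj h]

-- A's insertion phase when a shallow block permanently blocks the level-2 search:
-- every remaining segment is appended at the end, exactly the chain from bl.length
lemma pvInsLow (lineas : List String) (rlen : Nat) :
    ∀ (resto : List String) (pt : List String) (s0 : String)
      (bl : List (Int × String × List String)) (k : Nat),
      k = (s0 :: pt).length → pvLow s0 2 bl → rlen = k + resto.length →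
      insLoopA lineas rlen bl (s0 :: pt) k resto = chainB lineas rlen bl bl.length k resto := by
  intro resto
  induction resto with
  | nil => intro pt s0 bl k _ _ _; rfl
  | cons seg r2 ih =>
    intro pt s0 bl k hk hlow hlen
    have hscan : ∀ (xs : List String), buscarLoopA bl (s0 :: xs) 0 2 = -1 := by
      intro xs
      simp only [buscarLoopA]
      rw [List.drop_zero, pvLow_scan_none hlow 0]
    have hbuscar1 : buscarIndiceA bl ((s0 :: pt) ++ [seg]) = -1 := by
      unfold buscarIndiceA
      rw [List.cons_append]
      exact hscan (pt ++ [seg])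
    have hbuscar2 : buscarIndiceA bl (s0 :: pt) = -1 := by
      unfold buscarIndiceA
      exact hscan pt
    simp only [insLoopA]
    rw [hbuscar1]
    rw [if_neg (by norm_num)]
    have hk0 : ¬ k = 0 := by simp [hk]
    rw [if_neg hk0, hbuscar2, if_pos (by norm_num)]
    simp only [chainB]
    rw [pyInsert_at_length]
    have hres := ih (pt ++ [seg]) s0 (bl ++ [(2 + (k : Int), seg,
        if k = rlen - 1 then lineas else [])]) (k + 1)
      (by simp [hk]) (pvLow_append hlow _) (by simp at hlen ⊢; omega)
    rw [List.cons_append, hres]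
    congr 1
    simp

-- A's insertion phase when the descent is attached to a real parent chain:
-- the last matched/inserted block sits at index q, the block after it (if any) is
-- shallow enough to stop both the scan and the subtree walk, so each step inserts at q+1
lemma pvInsA (lineas : List String) (rlen : Nat) :
    ∀ (resto : List String) (pref : List String)
      (bl : List (Int × String × List String)) (k q : Nat),
      descendB bl pref 0 0 (-1) = (k, (q : Int)) → k = pref.length → 0 < k →
      (∃ b, bl[q]? = some b ∧ b.1 = 1 + (k : Int)) →
      (bl[q + 1]? = none ∨ ∃ b, bl[q + 1]? = some b ∧ b.1 ≤ (k : Int)) →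
      rlen = k + resto.length →
      insLoopA lineas rlen bl pref k resto = chainB lineas rlen bl (q + 1) k resto := by
  intro resto
  induction resto with
  | nil => intro pref bl k q _ _ _ _ _ _; rfl
  | cons seg r2 ih =>
    intro pref bl k q hsucc hk hkpos hq hnext hlen
    obtain ⟨bq, hbq, hbqlvl⟩ := hq
    have hqlen : q < bl.length := by
      by_contra hcon
      rw [List.getElem?_eq_none (by omega)] at hbq
      cases hbq
    have hprefne : pref ≠ [] := by intro hcon; rw [hcon] at hk; simp at hk; omega
    have hsucc' : descendB bl pref 0 0 (-1) = (0 + pref.length, (q : Int)) := by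
      rw [hsucc]; congr 1; omega
    -- the scan for the next segment fails right after q
    have hdropq : scanGoA seg (2 + (k : Int)) (bl.drop (q + 1)) (q + 1) = none := by
      rcases hnext with hn | ⟨b, hb, hble⟩
      · have hle : bl.length ≤ q + 1 := by
          by_contra hcon
          rw [List.getElem?_eq_getElem (by omega)] at hn
          cases hn
        rw [List.drop_eq_nil_of_le hle]; rfl
      · rw [drop_cons_of_get? hb]
        obtain ⟨n, t, c⟩ := b
        simp only at hble
        simp only [scanGoA]
        rw [if_pos (by omega)]
    have hstep : descendB bl (pref ++ [seg]) 0 0 (-1) = (k, (q : Int)) := by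
      rw [descend_comp hsucc' hprefne]
      have htn : ((q : Int)).toNat = q := by omega
      rw [htn]
      simp only [descendB]
      rw [show (2 : Int) + ((0 + pref.length : Nat) : Int) = 2 + (k : Int) by rw [← hk]; push_cast; ring]
      rw [hdropq]
      show ((0 + pref.length : Nat), (q : Int)) = (k, (q : Int))
      congr 1
      omega
    have hbuscar1 : buscarIndiceA bl (pref ++ [seg]) = -1 := by
      unfold buscarIndiceA
      rw [show (2 : Int) = 2 + ((0 : Nat) : Int) by norm_num]
      rw [buscar_eq bl (pref ++ [seg]) 0 0 (-1), hstep]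
      rw [if_neg (by simp; omega)]
    have hbuscar2 : buscarIndiceA bl pref = (q : Int) := by
      unfold buscarIndiceA
      rw [show (2 : Int) = 2 + ((0 : Nat) : Int) by norm_num]
      rw [buscar_eq bl pref 0 0 (-1), hsucc]
      rw [if_pos (by omega), if_neg hprefne]
    -- subtree end of q is q+1
    have hfin : finSubA bl q = q + 1 := by
      unfold finSubA
      rw [hbq]
      simp only [Option.getD_some]
      rcases hnext with hn | ⟨b, hb, hble⟩
      · have hle : bl.length ≤ q + 1 := by
          by_contra hcon
          rw [List.getElem?_eq_getElem (by omega)] at hn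
          cases hn
        rw [List.drop_eq_nil_of_le hle]
        simp [finGoA]
      · rw [drop_cons_of_get? hb]
        simp only [finGoA]
        rw [if_pos (by rw [hbqlvl]; omega)]
    simp only [insLoopA]
    rw [hbuscar1, if_neg (by norm_num), if_neg (by omega), hbuscar2]
    rw [if_neg (by omega)]
    have htn : ((q : Int)).toNat = q := by omega
    rw [htn, hfin]
    simp only [chainB]
    set N : Int × String × List String := (2 + (k : Int), seg, if k = rlen - 1 then lineas else []) with hN
    set bl1 := pyInsert bl (q + 1) N with hbl1
    have hq1len : q + 1 ≤ bl.length := by omega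
    -- descent in the grown list finds the new block at q+1
    have hsucc1 : descendB bl1 pref 0 0 (-1) = (0 + pref.length, (q : Int)) :=
      descend_stab hsucc' (Or.inl (by omega)) (by omega) hq1len
    have hstep1 : descendB bl1 (pref ++ [seg]) 0 0 (-1) = (k + 1, ((q + 1 : Nat) : Int)) := by
      rw [descend_comp hsucc1 hprefne]
      have htn2 : ((q : Int)).toNat = q := by omega
      rw [htn2]
      simp only [descendB]
      have hscan1 : scanGoA seg (2 + ((0 + pref.length : Nat) : Int)) (bl1.drop (q + 1)) (q + 1) =
          some (q + 1) := by
        rw [show ((0 + pref.length : Nat) : Int) = (k : Int) by rw [← hk]; push_cast; ring]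
        have hdrop1 : bl1.drop (q + 1) = N :: bl.drop (q + 1) := by
          rw [hbl1, drop_pyInsert_of_le (le_refl _) hq1len]
          simp
        rw [hdrop1, hN]
        simp only [scanGoA]
        rw [if_neg (by omega), if_pos (by simp [pvCoin_refl])]
      rw [hscan1]
      simp only [descendB]
      congr 1
      simp [hk]
    have hres := ih (pref ++ [seg]) bl1 (k + 1) (q + 1)
      (by rw [hstep1]) (by simp [hk]) (by omega)
      (⟨N, by rw [hbl1, get?_pyInsert_self hq1len], by rw [hN]; push_cast; ring⟩)
      (by
        have hsh : bl1[q + 1 + 1]? = bl[q + 1]? := by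
          rw [hbl1, get?_pyInsert_succ hq1len]
        rcases hnext with hn | ⟨b, hb, hble⟩
        · exact Or.inl (by rw [hsh, hn])
        · exact Or.inr ⟨b, by rw [hsh, hb], by push_cast; omega⟩)
      (by simp at hlen ⊢; omega)
    exact hres

-- the main correspondence: A's loop from a successfully descended prefix state equals
-- "finish the descent, then chain the missing tail"
lemma pvMain (lineas : List String) (rlen : Nat) :
    ∀ (rest : List String) (pref : List String)
      (bl : List (Int × String × List String)) (i k : Nat) (last : Int),
      ((pref = [] ∧ k = 0 ∧ i = 0 ∧ last = -1) ∨
       (k = pref.length ∧ 0 < k ∧ 0 < i ∧ last = (i : Int) - 1 ∧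
        descendB bl pref 0 0 (-1) = (k, last))) →
      rlen = k + rest.length →
      insLoopA lineas rlen bl pref k rest =
        (if (descendB bl rest i k last).1 = k + rest.length then bl
         else chainB lineas rlen bl
           (if (descendB bl rest i k last).1 = 0 then bl.length
            else finSubA bl (descendB bl rest i k last).2.toNat)
           (descendB bl rest i k last).1
           (rest.drop ((descendB bl rest i k last).1 - k))) := by
  intro rest
  induction rest with
  | nil =>
    intro pref bl i k last _ _
    simp [insLoopA, descendB]
  | cons seg resto ih =>
    intro pref bl i k last hst hlen
    cases hscan : scanGoA seg (2 + (k : Int)) (bl.drop i) i with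
    | some j =>
      -- segment found: A continues, the descent advances
      have hd_eq : descendB bl (seg :: resto) i k last =
          descendB bl resto (j + 1) (k + 1) (j : Int) := by
        simp only [descendB]; rw [hscan]
      have hstep : descendB bl (pref ++ [seg]) 0 0 (-1) = (k + 1, (j : Int)) := by
        rcases hst with ⟨rfl, rfl, rfl, rfl⟩ | ⟨hk, hkpos, hipos, hlast, hsucc⟩
        · simp only [List.nil_append, descendB]
          rw [hscan]
        · have hsucc' : descendB bl pref 0 0 (-1) = (0 + pref.length, last) := by
            rw [hsucc]; congr 1; omega
          have hprefne : pref ≠ [] := by intro hcon; rw [hcon] at hk; simp at hk; omega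
          rw [descend_comp hsucc' hprefne]
          have htn : last.toNat + 1 = i := by omega
          rw [htn]
          simp only [descendB]
          rw [show (2 : Int) + ((0 + pref.length : Nat) : Int) = 2 + (k : Int) by
            rw [← hk]; push_cast; ring]
          rw [hscan]
          simp [descendB, hk]
      have hklen : k + 1 = (pref ++ [seg]).length := by
        rcases hst with ⟨rfl, rfl, _, _⟩ | ⟨hk, _, _, _, _⟩
        · rfl
        · simp [hk]
      have hbuscar : buscarIndiceA bl (pref ++ [seg]) = (j : Int) := by
        unfold buscarIndiceA
        rw [show (2 : Int) = 2 + ((0 : Nat) : Int) by norm_num]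
        rw [buscar_eq bl (pref ++ [seg]) 0 0 (-1), hstep]
        rw [if_pos (by rw [← hklen]; simp), if_neg (by simp)]
      simp only [insLoopA]
      rw [hbuscar, if_pos (Int.natCast_nonneg j)]
      have hres := ih (pref ++ [seg]) bl (j + 1) (k + 1) (j : Int)
        (Or.inr ⟨hklen, by omega, by omega, by omega, hstep⟩)
        (by simp at hlen ⊢; omega)
      rw [hres, hd_eq]
      have hge := descendB_d_ge bl resto (j + 1) (k + 1) (j : Int)
      by_cases hfull : (descendB bl resto (j + 1) (k + 1) (j : Int)).1 = (k + 1) + resto.length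
      · have hfull2 : (descendB bl resto (j + 1) (k + 1) (j : Int)).1
            = k + (seg :: resto).length := by
          simp only [List.length_cons]; omega
        rw [if_pos hfull, if_pos hfull2]
      · have hfull2 : ¬ (descendB bl resto (j + 1) (k + 1) (j : Int)).1
            = k + (seg :: resto).length := by
          simp only [List.length_cons]; omega
        have hd1 : ¬ (descendB bl resto (j + 1) (k + 1) (j : Int)).1 = 0 := by omega
        rw [if_neg hfull, if_neg hd1, if_neg hfull2]
        congr 1
        have hge1 : (descendB bl resto (j + 1) (k + 1) (j : Int)).1 - k =
            ((descendB bl resto (j + 1) (k + 1) (j : Int)).1 - (k + 1)) + 1 := by omega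
        rw [hge1, List.drop_succ_cons]
    | none =>
      -- segment missing: A inserts the whole remaining tail; the chain starts here
      have hd_eq1 : (descendB bl (seg :: resto) i k last).1 = k := by
        simp only [descendB]; rw [hscan]
      have hd_eq2 : (descendB bl (seg :: resto) i k last).2 = last := by
        simp only [descendB]; rw [hscan]
      rw [hd_eq1, hd_eq2]
      rw [if_neg (by simp only [List.length_cons]; omega)]
      rw [Nat.sub_self, List.drop_zero]
      rcases hst with ⟨rfl, rfl, rfl, rfl⟩ | ⟨hk, hkpos, hipos, hlast, hsucc⟩
      · -- k = 0 : the whole route is missing, everything goes to the end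
        rw [if_pos rfl]
        have hlvl : (2 : Int) + ((0 : Nat) : Int) = 2 := by norm_num
        rw [List.drop_zero, hlvl] at hscan
        have hbuscar : buscarIndiceA bl ([] ++ [seg]) = -1 := by
          unfold buscarIndiceA
          simp only [List.nil_append, buscarLoopA, List.drop_zero, hscan]
        simp only [insLoopA]
        rw [hbuscar, if_neg (by norm_num)]
        simp only [if_true]
        rw [pyInsert_at_length]
        simp only [chainB]
        rw [pyInsert_at_length]
        rcases scan_none_cases hscan with hlow | hnohit
        · -- a shallow block hides the whole chain: everything is appended
          have hres := pvInsLow lineas rlen resto []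
            seg (bl ++ [(2 + ((0 : Nat) : Int), seg, if 0 = rlen - 1 then lineas else [])]) 1
            (by simp) (pvLow_append hlow _) (by simp at hlen ⊢; omega)
          simp only [List.nil_append]
          rw [hres]
          congr 1
          simp
        · -- the scan ran off the end: the appended block is found and the chain attaches
          set N : Int × String × List String :=
            (2 + ((0 : Nat) : Int), seg, if 0 = rlen - 1 then lineas else []) with hN
          have hdB : descendB (bl ++ [N]) [seg] 0 0 (-1) = (1, (bl.length : Int)) := by
            simp only [descendB]
            rw [List.drop_zero, hlvl]
            rw [scan_nohit_append hnohit]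
            simp only [scanGoA]
            rw [if_neg (by rw [hN]; norm_num)]
            rw [if_pos (by rw [hN]; simp [pvCoin_refl, beq_iff_eq])]
            simp [descendB]
          have hres := pvInsA lineas rlen resto [seg] (bl ++ [N]) 1 bl.length
            hdB (by simp) (by omega)
            ⟨N, by rw [List.getElem?_append_right (le_refl _)]; simp, by rw [hN]; norm_num⟩
            (Or.inl (List.getElem?_eq_none (by simp)))
            (by simp at hlen ⊢; omega)
          exact hres
      · -- k ≥ 1 : the chain attaches after the subtree of the matched parent
        rw [if_neg (by omega)]
        have hprefne : pref ≠ [] := by intro hcon; rw [hcon] at hk; simp at hk; omega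
        have hsucc' : descendB bl pref 0 0 (-1) = (0 + pref.length, last) := by
          rw [hsucc]; congr 1; omega
        obtain ⟨hl0, _, bq, hbq, hbqlvl0⟩ := descend_success hsucc' hprefne
        have hbqlvl : bq.1 = 1 + (k : Int) := by rw [hbqlvl0, hk]; push_cast; ring
        have hq0i : last.toNat + 1 = i := by omega
        have hq0len : last.toNat < bl.length := by
          by_contra hcon
          rw [List.getElem?_eq_none (by omega)] at hbq
          cases hbq
        have hile : i ≤ bl.length := by omega
        -- A rejects the extended prefix
        have hstep : descendB bl (pref ++ [seg]) 0 0 (-1) = (k, last) := by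
          rw [descend_comp hsucc' hprefne, hq0i]
          simp only [descendB]
          rw [show (2 : Int) + ((0 + pref.length : Nat) : Int) = 2 + (k : Int) by
            rw [← hk]; push_cast; ring]
          rw [hscan]
          show ((0 + pref.length : Nat), last) = (k, last)
          congr 1
          omega
        have hbuscar1 : buscarIndiceA bl (pref ++ [seg]) = -1 := by
          unfold buscarIndiceA
          rw [show (2 : Int) = 2 + ((0 : Nat) : Int) by norm_num]
          rw [buscar_eq bl (pref ++ [seg]) 0 0 (-1), hstep]
          rw [if_neg (by simp only [List.length_append, List.length_cons, List.length_nil]; omega)]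
        have hbuscar2 : buscarIndiceA bl pref = last := by
          unfold buscarIndiceA
          rw [show (2 : Int) = 2 + ((0 : Nat) : Int) by norm_num]
          rw [buscar_eq bl pref 0 0 (-1), hsucc']
          rw [if_pos rfl, if_neg hprefne]
        -- the insertion position: end of the parent's subtree
        obtain ⟨l1, l2, hdrop, hgt, hfin, hend⟩ :=
          finGo_split (1 + (k : Int)) (bl.drop i) i
        have hl1len : l1.length ≤ bl.length - i := by
          have := congrArg List.length hdrop
          simp only [List.length_drop, List.length_append] at this
          omega
        have hposle : i + l1.length ≤ bl.length := by omega
        have hposval : finSubA bl last.toNat = i + l1.length := by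
          unfold finSubA
          rw [hbq, hq0i]
          simp only [Option.getD_some]
          rw [hbqlvl]
          exact hfin
        have hnh : pvNoHit seg (2 + (k : Int)) l1 := by
          rw [hdrop] at hscan
          exact scan_none_nohit (fun b hb => by have := hgt b hb; omega) hscan
        simp only [insLoopA]
        rw [hbuscar1, if_neg (by norm_num), if_neg (by omega), hbuscar2,
          if_neg (by omega), hposval]
        set N : Int × String × List String :=
          (2 + (k : Int), seg, if k = rlen - 1 then lineas else []) with hN
        set bl1 := pyInsert bl (i + l1.length) N with hbl1
        have hdrop1 : bl1.drop i = l1 ++ N :: bl.drop (i + l1.length) := by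
          rw [hbl1, drop_pyInsert_of_le (by omega) hposle]
          congr 2
          rw [Nat.add_sub_cancel_left, hdrop]
          exact List.take_left
        have hstab : descendB bl1 pref 0 0 (-1) = (0 + pref.length, last) :=
          descend_stab hsucc' (Or.inl (by omega)) (by omega) hposle
        have hstep1 : descendB bl1 (pref ++ [seg]) 0 0 (-1) =
            (k + 1, ((i + l1.length : Nat) : Int)) := by
          rw [descend_comp hstab hprefne, hq0i]
          simp only [descendB]
          rw [show (2 : Int) + ((0 + pref.length : Nat) : Int) = 2 + (k : Int) by
            rw [← hk]; push_cast; ring]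
          rw [hdrop1, scan_nohit_append hnh]
          simp only [scanGoA]
          rw [if_neg (by rw [hN]; exact lt_irrefl _)]
          rw [if_pos (by rw [hN]; simp [pvCoin_refl])]
          simp only [descendB]
          congr 1
          omega
        have hnext1 : bl1[i + l1.length + 1]? = none ∨
            ∃ b, bl1[i + l1.length + 1]? = some b ∧ b.1 ≤ ((k + 1 : Nat) : Int) := by
          have hsh : bl1[i + l1.length + 1]? = bl[i + l1.length]? := by
            rw [hbl1]; exact get?_pyInsert_succ hposle
          rcases hend with rfl | ⟨b, t, rfl, hble⟩
          · refine Or.inl ?_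
            rw [hsh]
            apply List.getElem?_eq_none
            have := congrArg List.length hdrop
            simp only [List.length_drop, List.append_nil] at this
            omega
          · refine Or.inr ⟨b, ?_, by push_cast; omega⟩
            rw [hsh]
            have h0 : (bl.drop i)[l1.length]? = some b := by
              rw [hdrop, List.getElem?_append_right (le_refl _)]
              simp
            rw [List.getElem?_drop] at h0
            exact h0
        have hres := pvInsA lineas rlen resto (pref ++ [seg]) bl1 (k + 1) (i + l1.length)
          hstep1 (by simp [hk]) (by omega)
          ⟨N, by rw [hbl1]; exact get?_pyInsert_self hposle, by rw [hN]; push_cast; ring⟩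
          hnext1 (by simp at hlen ⊢; omega)
        rw [hres]
        simp only [chainB]
        rw [hbl1, hN]

-- B's single walk computes exactly the per-segment descent
lemma walk_eq_descend (ruta : List String) (bl : List (Int × String × List String)) :
    ∀ (l : List (Int × String × List String)) (i d : Nat) (last : Int),
      l = bl.drop i → d ≤ ruta.length →
      walkB ruta l i d last = descendB bl (ruta.drop d) i d last := by
  intro l
  induction l with
  | nil =>
    intro i d last hl _
    cases hrd : ruta.drop d with
    | nil => simp [walkB, descendB]
    | cons seg rest =>
      simp only [walkB, descendB]
      rw [← hl]
      simp [scanGoA]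
  | cons b r ih =>
    intro i d last hl hd
    obtain ⟨nivel, titulo, c⟩ := b
    by_cases hdl : d = ruta.length
    · have : ruta.drop d = [] := List.drop_eq_nil_of_le (by omega)
      rw [this]
      simp only [walkB, descendB]
      rw [if_pos (Or.inl hdl)]
    · have hdlt : d < ruta.length := by omega
      obtain ⟨seg, hseg⟩ : ∃ seg, ruta[d]? = some seg :=
        ⟨ruta[d]'hdlt, List.getElem?_eq_getElem hdlt⟩
      have hrd : ruta.drop d = seg :: ruta.drop (d + 1) := by
        rw [List.drop_eq_getElem_cons hdlt]
        rw [List.getElem?_eq_getElem hdlt] at hseg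
        rw [Option.some.inj hseg]
      have hgd : ruta.getD d "" = seg := by
        rw [List.getD_eq_getElem?_getD, hseg]; rfl
      have hr : r = bl.drop (i + 1) := by
        have := congrArg (List.drop 1) hl
        simpa using this
      by_cases h1 : nivel < 2 + (d : Int)
      · have hscan : scanGoA seg (2 + (d : Int)) (bl.drop i) i = none := by
          rw [← hl]; simp only [scanGoA]; rw [if_pos h1]
        rw [hrd]
        simp only [walkB, descendB]
        rw [hscan, if_pos (Or.inr h1)]
      · by_cases h2 : (nivel == 2 + (d : Int) && pvCoin titulo seg) = true
        · have hscan : scanGoA seg (2 + (d : Int)) (bl.drop i) i = some i := by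
            rw [← hl]; simp only [scanGoA]; rw [if_neg h1, if_pos h2]
          rw [hrd]
          simp only [walkB, descendB]
          rw [hscan, hgd, if_neg (by simp only [not_or]; exact ⟨hdl, h1⟩), if_pos h2]
          exact ih (i + 1) (d + 1) (i : Int) hr (by omega)
        · have hscan2 : scanGoA seg (2 + (d : Int)) (bl.drop i) i
              = scanGoA seg (2 + (d : Int)) (bl.drop (i + 1)) (i + 1) := by
            rw [← hl]; simp only [scanGoA]; rw [if_neg h1, if_neg h2, hr]
          rw [hrd]
          simp only [walkB, descendB]
          rw [hgd, if_neg (by simp only [not_or]; exact ⟨hdl, h1⟩), if_neg h2]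
          rw [ih (i + 1) d last hr (by omega), hrd]
          simp only [descendB]
          rw [hscan2]

-- finGoA expressed through findIdx?
lemma finGoA_findIdx (nivel : Int) :
    ∀ (l : List (Int × String × List String)) (j : Nat),
      finGoA nivel l j =
        match l.findIdx? (fun b => b.1 ≤ nivel) with
        | some t => j + t
        | none => j + l.length := by
  intro l
  induction l with
  | nil => intro j; simp [finGoA]
  | cons b r ih =>
    intro j
    by_cases hb : b.1 ≤ nivel
    · simp [finGoA, hb, List.findIdx?_cons]
    · simp only [finGoA, if_neg hb, ih (j + 1), List.findIdx?_cons]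
      rw [if_neg (by simpa using hb)]
      cases hf : r.findIdx? (fun b => b.1 ≤ nivel) with
      | none =>
        show j + 1 + r.length = j + (r.length + 1)
        omega
      | some t =>
        show j + 1 + t = j + (t + 1)
        omega

lemma posB_eq_finSubA (bl : List (Int × String × List String)) (last : Int)
    (h0 : 0 ≤ last) (hlt : last < (bl.length : Int)) :
    posB bl last = finSubA bl last.toNat := by
  unfold posB finSubA
  rw [finGoA_findIdx]
  cases hf : (bl.drop (last.toNat + 1)).findIdx? (fun b => b.1 ≤ (bl[last.toNat]?.getD (0, "", [])).1) with
  | some t => rfl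
  | none =>
    show bl.length = last.toNat + 1 + (bl.drop (last.toNat + 1)).length
    simp only [List.length_drop]
    omega

lemma finSubA_le (bl : List (Int × String × List String)) (idx : Nat)
    (hidx : idx < bl.length) : finSubA bl idx ≤ bl.length := by
  unfold finSubA
  rw [finGoA_findIdx]
  cases hf : (bl.drop (idx + 1)).findIdx? (fun b => b.1 ≤ (bl[idx]?.getD (0, "", [])).1) with
  | some t =>
    have ht := (List.findIdx?_eq_some_iff_findIdx_eq.1 hf).1
    simp only [List.length_drop] at ht
    show idx + 1 + t ≤ bl.length
    omega
  | none =>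
    show idx + 1 + (bl.drop (idx + 1)).length ≤ bl.length
    simp only [List.length_drop]
    omega

-- the chain of inserts at consecutive positions is one splice of the built tail
lemma chain_splice (ruta lineas : List String) :
    ∀ (resto : List String) (k : Nat) (bl : List (Int × String × List String)) (pos : Nat),
      pos ≤ bl.length → resto = ruta.drop k → k ≤ ruta.length →
      chainB lineas ruta.length bl pos k resto =
        bl.take pos ++ ((PySem.List.pyRange (k : Int) (ruta.length : Int) 1).map
          (fun j => (2 + j, ruta.getD j.toNat "",
            if j = (ruta.length : Int) - 1 then lineas else ([] : List String)))) ++ bl.drop pos := by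
  intro resto
  induction resto with
  | nil =>
    intro k bl pos hpos hdrop hk
    have hkl : k = ruta.length := by
      have := congrArg List.length hdrop
      simp only [List.length_nil, List.length_drop] at this
      omega
    subst hkl
    rw [PySem.List.pyRange_one_eq_nil (le_refl _)]
    simp [chainB]
  | cons seg r2 ih =>
    intro k bl pos hpos hdrop hk
    have hklt : k < ruta.length := by
      by_contra hcon
      rw [List.drop_eq_nil_of_le (by omega)] at hdrop
      cases hdrop
    have hseg : ruta[k]? = some seg := by
      have h1 : (ruta.drop k)[0]? = some seg := by rw [← hdrop]; rfl
      rw [List.getElem?_drop, Nat.add_zero] at h1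
      exact h1
    have hr2 : r2 = ruta.drop (k + 1) := by
      have := congrArg (List.drop 1) hdrop
      simpa [List.drop_drop] using this
    simp only [chainB]
    set N : Int × String × List String :=
      (2 + (k : Int), seg, if k = ruta.length - 1 then lineas else []) with hN
    rw [ih (k + 1) (pyInsert bl pos N) (pos + 1)
      (by rw [length_pyInsert hpos]; omega) hr2 (by omega)]
    have htake : (pyInsert bl pos N).take (pos + 1) = bl.take pos ++ [N] := by
      unfold pyInsert
      rw [List.take_append]
      have hl : (bl.take pos).length = pos := by rw [List.length_take]; omega
      rw [List.take_of_length_le (by omega), hl]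
      have h1 : pos + 1 - pos = 1 := by omega
      rw [h1]
      rfl
    have hdropp : (pyInsert bl pos N).drop (pos + 1) = bl.drop pos := by
      unfold pyInsert
      rw [List.drop_append]
      have hl : (bl.take pos).length = pos := by rw [List.length_take]; omega
      rw [List.drop_eq_nil_of_le (by omega), hl]
      have h1 : pos + 1 - pos = 1 := by omega
      rw [h1]
      rfl
    rw [htake, hdropp]
    have hcast : ((k + 1 : Nat) : Int) = (k : Int) + 1 := by push_cast; ring
    rw [hcast]
    rw [show PySem.List.pyRange (k : Int) (ruta.length : Int) 1
        = (k : Int) :: PySem.List.pyRange ((k : Int) + 1) (ruta.length : Int) 1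
      from PySem.List.pyRange_one_cons (by exact_mod_cast hklt)]
    simp only [List.map_cons]
    have hfN : ((2 + (k : Int), ruta.getD ((k : Int)).toNat "",
        if (k : Int) = (ruta.length : Int) - 1 then lineas else ([] : List String))) = N := by
      rw [hN]
      simp only [Int.toNat_natCast]
      rw [List.getD_eq_getElem?_getD, hseg]
      simp only [Option.getD_some]
      have hcond : ((k : Int) = (ruta.length : Int) - 1) ↔ (k = ruta.length - 1) := by omega
      by_cases h : k = ruta.length - 1
      · rw [if_pos (hcond.2 h), if_pos h]
      · rw [if_neg (fun hc => h (hcond.1 hc)), if_neg h]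
    rw [hfN]
    simp [List.append_assoc]

-- B's top level, lets zeta-reduced
lemma alt_unfold (bl : List (Int × String × List String)) (ruta lineas : List String) :
    insertar_seccion_py_alt bl ruta lineas =
      if (walkB ruta bl 0 0 (-1)).1 = ruta.length then bl
      else
        bl.take (if (walkB ruta bl 0 0 (-1)).1 = 0 then bl.length
                 else posB bl (walkB ruta bl 0 0 (-1)).2)
        ++ ((PySem.List.pyRange ((walkB ruta bl 0 0 (-1)).1 : Int) (ruta.length : Int) 1).map
            (fun k => (2 + k, ruta.getD k.toNat "",
              if k = (ruta.length : Int) - 1 then lineas else ([] : List String))))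
        ++ bl.drop (if (walkB ruta bl 0 0 (-1)).1 = 0 then bl.length
                    else posB bl (walkB ruta bl 0 0 (-1)).2) := rfl

-- ===== VERDICT (by name: the statement is the Claim_ definition above) =====
theorem insertar_seccion_py_spec : Claim_equal_insertar_seccion_py := by
  intro bloques ruta lineas_texto _
  unfold Spec_insertar_seccion_py
  unfold insertar_seccion_py
  rw [pvMain lineas_texto ruta.length ruta [] bloques 0 0 (-1)
    (Or.inl ⟨rfl, rfl, rfl, rfl⟩) (by simp), alt_unfold,
    walk_eq_descend ruta bloques bloques 0 0 (-1) rfl (Nat.zero_le _)]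
  simp only [List.drop_zero, Nat.zero_add, Nat.sub_zero]
  set r := descendB bloques ruta 0 0 (-1) with hr
  by_cases h1 : r.1 = ruta.length
  · rw [if_pos h1, if_pos h1]
  · rw [if_neg h1, if_neg h1]
    have hk_le : r.1 ≤ ruta.length := by
      have := descendB_d_le bloques ruta 0 0 (-1)
      rw [← hr] at this
      simpa using this
    have hvalid : r.1 ≠ 0 → 0 ≤ r.2 ∧ r.2 < (bloques.length : Int) := by
      intro h0
      have := descendB_last_valid bloques ruta 0 0 (-1)
        (fun h => absurd h (lt_irrefl 0)) (by rw [← hr]; omega)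
      rw [← hr] at this
      exact this
    have hpos_eq : (if r.1 = 0 then bloques.length else posB bloques r.2)
        = (if r.1 = 0 then bloques.length else finSubA bloques r.2.toNat) := by
      by_cases h0 : r.1 = 0
      · rw [if_pos h0, if_pos h0]
      · rw [if_neg h0, if_neg h0, posB_eq_finSubA _ _ (hvalid h0).1 (hvalid h0).2]
    rw [hpos_eq]
    exact chain_splice ruta lineas_texto (ruta.drop r.1) r.1 bloques _
      (by
        by_cases h0 : r.1 = 0
        · rw [if_pos h0]
        · rw [if_neg h0]; exact finSubA_le _ _ (by have := hvalid h0; omega))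
      rfl hk_le
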